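-- pv_equiv track=rewrite | github.com/mhasan-t/ftp_crawler_imdbpy | etc_files/read_urls_tv.py | take_url_tv
-- ===== SOURCE A (Python) =====
-- def take_url_tv(file):
--     le = len(file)
--     z = 0
--     x = 0
--     for i in range(-1, -le - 1, -1):
--         if file[i] == '/':
--             z = i
--             break
--
--     for i in range(z - 1, -le - 1, -1):
--         if file[i] == '/':
--             x = i
--             break
--
--     sliceobj = slice(0, x, 1)
--     return file[sliceobj]
-- ===== SOURCE B (Python) =====
-- def take_url_tv(file):
--     parts = file.rsplit('/', 2)
--     if len(parts) < 3:
--         return ''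
--     return parts[0]
-- ===== Notes on version B (the rewrite author's own statement) =====
-- stated objective: simpler
-- what changed: Replaces A's two reverse index-scan loops with negative indices and a negative-index slice by a single rsplit('/', 2) followed by a length guard and taking the first component.
import Mathlib
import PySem

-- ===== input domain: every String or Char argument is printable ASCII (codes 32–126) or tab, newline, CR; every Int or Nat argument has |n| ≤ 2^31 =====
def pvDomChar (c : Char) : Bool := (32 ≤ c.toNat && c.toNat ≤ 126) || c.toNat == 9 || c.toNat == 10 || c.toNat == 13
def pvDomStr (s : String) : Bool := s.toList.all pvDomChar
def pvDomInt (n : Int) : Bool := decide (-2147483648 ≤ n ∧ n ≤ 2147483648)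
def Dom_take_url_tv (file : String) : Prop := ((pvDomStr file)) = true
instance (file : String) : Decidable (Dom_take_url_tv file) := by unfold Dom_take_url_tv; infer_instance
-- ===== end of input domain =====

-- B replaces A's two reverse index-scan loops and negative-index slice by a single
-- rsplit('/', 2) decomposition, returning the first component (simpler; same O(n) cost).


-- ===== PORT A =====
-- A's `for i in range(…): if file[i] == '/': <var> = i; break` loop: first index in the
-- range whose character is '/', else the default (the variable's initial value 0).
def pvFindSlash (file : String) : List Int → Int → Int
  | [], d => d
  | i :: rest, d =>
    if PySem.Str.pyGet? file i = some '/' then i else pvFindSlash file rest d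

def take_url_tv (file : String) : String :=
  let le : Int := PySem.Str.len file
  let z : Int := pvFindSlash file (PySem.List.pyRange (-1) (-le - 1) (-1)) 0
  let x : Int := pvFindSlash file (PySem.List.pyRange (z - 1) (-le - 1) (-1)) 0
  PySem.Str.slice file (some 0) (some x)

-- ===== PORT B =====
-- hand port of file.rsplit('/', 2) (PySem has no rsplit): split off at most two
-- components from the right of the reversed character list.
def pvRsplitSlash2 (l : List Char) : List (List Char) :=
  let r := l.reverse
  let c1 := r.takeWhile (· != '/')
  match r.dropWhile (· != '/') with
  | [] => [l]
  | _ :: t1 =>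
    let c2 := t1.takeWhile (· != '/')
    match t1.dropWhile (· != '/') with
    | [] => [t1.reverse, c1.reverse]
    | _ :: t2 => [t2.reverse, c2.reverse, c1.reverse]

def take_url_tv_alt (file : String) : String :=
  let parts := pvRsplitSlash2 file.toList
  if parts.length < 3 then "" else String.ofList (parts.getD 0 [])

-- ===== PRECONDITION & SPEC =====
def Spec_take_url_tv (file : String) (out : String) : Prop := out = take_url_tv_alt file
instance (file : String) (out : String) : Decidable (Spec_take_url_tv file out) := by unfold Spec_take_url_tv; infer_instance

-- ===== CLAIM (what is proved, stated in full; the proofs are below) =====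
def Claim_equal_take_url_tv : Prop := ∀ (file : String), Dom_take_url_tv file → Spec_take_url_tv file (take_url_tv file)

-- ===== LEMMAS AND PROOFS =====

-- A's scan loop, characterised: scanning i = -(j+1), -(j+2), … over `file` is a
-- left-to-right search for '/' in `u = file.toList.reverse.drop j`.
theorem pvFindSlash_eq (file : String) (d : Int) :
    ∀ (u : List Char) (j : Nat), u = file.toList.reverse.drop j →
      pvFindSlash file (PySem.List.pyRange (-(j : Int) - 1) (-(file.toList.length : Int) - 1) (-1)) d =
        if u.dropWhile (· != '/') = [] then d
        else -((j : Int) + (u.takeWhile (· != '/')).length + 1) := by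
  intro u
  induction u with
  | nil =>
    intro j hu
    have h := congrArg List.length hu
    rw [List.length_drop, List.length_reverse] at h
    simp only [List.length_nil] at h
    have hn : file.toList.length ≤ j := by omega
    rw [PySem.List.pyRange_neg_one_eq_nil (by omega)]
    simp [pvFindSlash]
  | cons c u' ih =>
    intro j hu
    have hj : j < file.toList.length := by
      by_contra h
      have hdn : file.toList.reverse.drop j = [] :=
        List.drop_eq_nil_of_le (by rw [List.length_reverse]; omega)
      rw [hdn] at hu
      exact (List.cons_ne_nil c u') hu
    have h0 : (file.toList.reverse.drop j)[0]? = some c := by rw [← hu]; rfl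
    have hc : file.toList.reverse[j]? = some c := by
      rw [List.getElem?_drop] at h0; simpa using h0
    have hcl : file.toList[file.toList.length - 1 - j]? = some c := by
      rw [← List.getElem?_reverse (by simpa using hj)]
      exact hc
    have hL : file.toList.length = file.length := by simp
    have hget : PySem.Str.pyGet? file (-(j : Int) - 1) = some c := by
      simp only [PySem.Str.pyGet?_eq, PySem.Chars.pyGet?_eq_listPyGet?,
        PySem.List.pyGet?, PySem.List.pyIdx?]
      rw [if_neg (by omega), if_pos (by omega)]
      rw [show (-(-(j:Int) - 1)).toNat = j + 1 by omega]
      show file.toList[file.toList.length - (j + 1)]? = some c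
      rw [show file.toList.length - (j + 1) = file.toList.length - 1 - j by omega]
      exact hcl
    have hdrop : u' = file.toList.reverse.drop (j + 1) := by
      rw [← List.tail_drop, ← hu]
      rfl
    rw [PySem.List.pyRange_neg_one_cons (by omega)]
    simp only [pvFindSlash, hget]
    by_cases hcc : c = '/'
    · subst hcc
      rw [if_pos rfl]
      simp [List.dropWhile, List.takeWhile]
      omega
    · rw [if_neg (by simp [hcc])]
      have harith : -(j : Int) - 1 - 1 = -((j + 1 : Nat) : Int) - 1 := by push_cast; ring
      rw [harith, ih (j + 1) hdrop]
      have hb : (c != '/') = true := by simp [hcc]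
      simp only [List.dropWhile, List.takeWhile, hb]
      split
      · rfl
      · simp only [List.length_cons]
        push_cast
        ring

theorem take_url_tv_spec : Claim_equal_take_url_tv := by
  unfold Claim_equal_take_url_tv
  intro file _
  unfold Spec_take_url_tv
  apply String.toList_inj.mp
  have hz := pvFindSlash_eq file 0 file.toList.reverse 0 (by simp)
  rw [show -(((0:Nat)):Int) - 1 = -1 by norm_num] at hz
  unfold take_url_tv
  simp only [PySem.Str.len_eq]
  rw [hz]
  by_cases h1 : file.toList.reverse.dropWhile (· != '/') = []
  case pos =>
    -- no slash at all: both loops find nothing, A slices [0:0], B has one part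
    rw [if_pos h1]
    have hx := pvFindSlash_eq file 0 file.toList.reverse 0 (by simp)
    rw [show -(((0:Nat)):Int) - 1 = -1 by norm_num] at hx
    rw [show (0:Int) - 1 = -1 by norm_num, hx, if_pos h1]
    have hB : take_url_tv_alt file = "" := by
      simp [take_url_tv_alt, pvRsplitSlash2, h1]
    rw [hB]
    simp only [PySem.Str.toList_slice, PySem.Chars.slice_eq_listSlice]
    rw [PySem.List.slice_zero_start, PySem.List.slice_to file.toList (le_refl 0)]
    simp
  case neg =>
    obtain ⟨s, t1, h1'⟩ : ∃ s t1, file.toList.reverse.dropWhile (· != '/') = s :: t1 := by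
      cases hh : file.toList.reverse.dropWhile (· != '/') with
      | nil => exact absurd hh h1
      | cons a b => exact ⟨a, b, rfl⟩
    rw [if_neg h1]
    set c1 := file.toList.reverse.takeWhile (· != '/') with hc1
    have hr : c1 ++ s :: t1 = file.toList.reverse := by
      rw [← h1', hc1]; exact List.takeWhile_append_dropWhile
    have hd1 : file.toList.reverse.drop (c1.length + 1) = t1 := by
      rw [← hr,
          show c1 ++ s :: t1 = (c1 ++ [s]) ++ t1 by simp,
          show c1.length + 1 = (c1 ++ [s]).length by simp,
          List.drop_left]
    have hx := pvFindSlash_eq file 0 t1 (c1.length + 1) hd1.symm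
    rw [show -(((0:Nat):Int) + ((c1.length : Int)) + 1) - 1
          = -(((c1.length + 1 : Nat)) : Int) - 1 by push_cast; ring,
        hx]
    by_cases h2 : t1.dropWhile (· != '/') = []
    case pos =>
      rw [if_pos h2]
      have hB : take_url_tv_alt file = "" := by
        simp [take_url_tv_alt, pvRsplitSlash2, h1', h2]
      rw [hB]
      simp only [PySem.Str.toList_slice, PySem.Chars.slice_eq_listSlice]
      rw [PySem.List.slice_zero_start, PySem.List.slice_to file.toList (le_refl 0)]
      simp
    case neg =>
      obtain ⟨s2, t2, h2'⟩ : ∃ s2 t2, t1.dropWhile (· != '/') = s2 :: t2 := by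
        cases hh : t1.dropWhile (· != '/') with
        | nil => exact absurd hh h2
        | cons a b => exact ⟨a, b, rfl⟩
      rw [if_neg h2]
      set c2 := t1.takeWhile (· != '/') with hc2
      have hr2 : c2 ++ s2 :: t2 = t1 := by
        rw [← h2', hc2]; exact List.takeWhile_append_dropWhile
      have hB : (take_url_tv_alt file).toList = t2.reverse := by
        simp [take_url_tv_alt, pvRsplitSlash2, h1', h2']
      rw [hB]
      -- A's slice [0 : -(|c1|+|c2|+2)] is the reverse of t2
      have hrfull : file.toList.reverse = c1 ++ s :: (c2 ++ s2 :: t2) := by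
        rw [hr2, hr]
      have hlen2 : file.toList.length = c1.length + c2.length + 2 + t2.length := by
        have hh := congrArg List.length hrfull
        simp only [List.length_reverse, List.length_append, List.length_cons] at hh
        omega
      have hfl : file.toList = t2.reverse ++ (s2 :: (c2.reverse ++ s :: c1.reverse)) := by
        calc file.toList = (file.toList.reverse).reverse := (List.reverse_reverse _).symm
          _ = _ := by rw [hrfull]; simp
      rw [show -(((c1.length + 1 : Nat) : Int) + ((c2.length : Nat) : Int) + 1)
            = -(((c1.length + c2.length + 2 : Nat)) : Int) by push_cast; ring]
      simp only [PySem.Str.toList_slice, PySem.Chars.slice_eq_listSlice]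
      rw [PySem.List.slice_zero_start]
      rw [PySem.List.slice_to_neg_natCast file.toList (c1.length + c2.length + 2) (by omega)]
      rw [show file.toList.length - (c1.length + c2.length + 2) = t2.length by omega]
      rw [hfl, show t2.length = t2.reverse.length by simp, List.take_left]
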